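-- pv_equiv track=rewrite | github.com/absalnC/pokerthing | wizard.py | highest
-- ===== SOURCE A (Python) =====
-- def highest(five):
-- 	mx=0
-- 	for c,v in five:
-- 		if v==1:
-- 			return 1
-- 		elif v>mx:
-- 			mx=v
-- 	return mx
-- ===== SOURCE B (Python) =====
-- def highest(five):
--     ranked = sorted([0] + [v for _, v in five],
--                     key=lambda v: (1 if v == 1 else 0, v), reverse=True)
--     return ranked[0]
-- ===== Notes on version B (the rewrite author's own statement) =====
-- stated objective: alternative
-- what changed: Replaces A's early-exit accumulator loop with a sort-then-pick: sort [0]+values descending by the priority key (v==1, v) and return the top element.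
import Mathlib
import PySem

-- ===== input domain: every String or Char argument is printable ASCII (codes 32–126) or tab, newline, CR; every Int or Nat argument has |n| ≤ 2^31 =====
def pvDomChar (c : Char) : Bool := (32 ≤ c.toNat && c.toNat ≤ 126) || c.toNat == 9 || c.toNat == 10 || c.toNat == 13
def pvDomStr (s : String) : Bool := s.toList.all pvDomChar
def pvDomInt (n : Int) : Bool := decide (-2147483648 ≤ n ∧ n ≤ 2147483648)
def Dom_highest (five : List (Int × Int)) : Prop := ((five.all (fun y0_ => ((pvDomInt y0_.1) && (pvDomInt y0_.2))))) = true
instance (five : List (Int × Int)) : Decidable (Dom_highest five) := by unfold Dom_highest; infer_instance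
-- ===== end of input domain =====

-- B replaces A's early-exit accumulator loop by sort-then-pick: sort [0]+values
-- descending by the priority key (v==1, v) and return the top element (alternative decomposition).

-- ===== PORT A =====
-- the for-loop with accumulator mx and early return on v == 1
def highestGo (mx : Int) : List (Int × Int) → Int
  | [] => mx
  | (_, v) :: rest => if v = 1 then 1 else if v > mx then highestGo v rest else highestGo mx rest

def highest (five : List (Int × Int)) : Int := highestGo 0 five

-- ===== PORT B =====
-- Python's tuple key (1 if v == 1 else 0, v) compared lexicographically = Lex (Int × Int)
def highKey (v : Int) : Lex (Int × Int) := toLex ((if v = 1 then 1 else 0), v)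

def highest_alt (five : List (Int × Int)) : Int :=
  let ranked := PySem.List.sorted ((0 : Int) :: five.map Prod.snd) highKey true
  match PySem.List.pyGet? ranked 0 with
  | some m => m
  | none => 0   -- unreachable: ranked is a permutation of a nonempty list

-- ===== PRECONDITION & SPEC =====
def Spec_highest (five : List (Int × Int)) (out : Int) : Prop := out = highest_alt five
instance (five : List (Int × Int)) (out : Int) : Decidable (Spec_highest five out) := by unfold Spec_highest; infer_instance

-- ===== CLAIM (what is proved, stated in full; the proofs are below) =====
def Claim_equal_highest : Prop := ∀ (five : List (Int × Int)), Dom_highest five → Spec_highest five (highest five)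

-- ===== LEMMAS AND PROOFS =====

-- A's loop in closed form
theorem highestGo_eq (l : List (Int × Int)) : ∀ (mx : Int),
    highestGo mx l = if (1 : Int) ∈ l.map Prod.snd then 1 else (l.map Prod.snd).foldl max mx := by
  induction l with
  | nil => intro mx; simp [highestGo]
  | cons p rest ih =>
    intro mx
    obtain ⟨c, v⟩ := p
    by_cases hv : v = 1
    · simp [highestGo, hv]
    · have hmax : (if v > mx then v else mx) = max mx v := by
        simp only [max_def]; split <;> split <;> omega
      simp only [highestGo, List.map_cons, List.mem_cons, List.foldl_cons, hv, if_false, ih, ← hmax]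
      have hor : ((1 : Int) = v ∨ (1 : Int) ∈ rest.map Prod.snd) ↔ ((1 : Int) ∈ rest.map Prod.snd) := by
        constructor
        · rintro (h | h)
          · exact absurd h.symm hv
          · exact h
        · exact Or.inr
      rw [if_congr hor rfl rfl]
      by_cases hgt : v > mx <;> simp [hgt]

-- foldl max over a list whose members are all ≤ the accumulator is the accumulator
theorem foldl_max_const (l : List Int) : ∀ (b : Int), (∀ y ∈ l, y ≤ b) → l.foldl max b = b := by
  induction l with
  | nil => intro b _; rfl
  | cons x xs ih =>
    intro b h
    have hx : x ≤ b := h x (List.mem_cons_self ..)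
    have : max b x = b := by omega
    simp only [List.foldl_cons, this]
    exact ih b fun y hy => h y (List.mem_cons_of_mem _ hy)

-- foldl max reaches the greatest member
theorem foldl_max_of_mem (l : List Int) : ∀ (a m : Int), m ∈ l → (∀ y ∈ l, y ≤ m) → a ≤ m →
    l.foldl max a = m := by
  induction l with
  | nil => intro a m hm; cases hm
  | cons x xs ih =>
    intro a m hm hub ha
    have hx : x ≤ m := hub x (List.mem_cons_self ..)
    simp only [List.foldl_cons]
    rcases List.mem_cons.mp hm with h | h
    · subst h
      have hacc : max a m = m := by omega
      rw [hacc]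
      exact foldl_max_const xs _ (by intro y hy; have := hub y (List.mem_cons_of_mem _ hy); omega)
    · exact ih _ m h (fun y hy => hub y (List.mem_cons_of_mem _ hy)) (by omega)

-- the head of the descending sort is A's answer
theorem head_ranked (five : List (Int × Int)) :
    ∀ {m : Int} {t : List Int},
      PySem.List.sorted ((0 : Int) :: five.map Prod.snd) highKey true = m :: t →
      m = if (1 : Int) ∈ five.map Prod.snd then 1 else (five.map Prod.snd).foldl max 0 := by
  intro m t hs
  set l : List Int := (0 : Int) :: five.map Prod.snd with hl
  have hmem : m ∈ l := (PySem.List.mem_sorted l highKey true m).mp (hs ▸ List.mem_cons_self ..)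
  have hub : ∀ y ∈ l, highKey y ≤ highKey m := PySem.List.key_head_sorted_rev_ge l highKey hs
  by_cases h1 : (1 : Int) ∈ five.map Prod.snd
  · -- the key of 1 is maximal in the first component, so m = 1
    have hk := hub 1 (List.mem_cons_of_mem _ h1)
    simp only [highKey] at hk
    by_cases hm1 : m = 1
    · simp [h1, hm1]
    · exfalso
      rw [if_neg hm1] at hk
      simp only [if_true] at hk
      rw [Prod.Lex.toLex_le_toLex] at hk
      rcases hk with h | ⟨h, _⟩ <;> omega
  · -- no 1 present: lex keys share first component 0, so m is the plain maximum
    have hm1 : m ≠ 1 := by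
      rcases List.mem_cons.mp hmem with h | h
      · omega
      · intro he; exact h1 (he ▸ h)
    have hub' : ∀ y ∈ l, y ≤ m := by
      intro y hy
      have hy1 : y ≠ 1 := by
        rcases List.mem_cons.mp hy with h | h
        · omega
        · intro he; exact h1 (he ▸ h)
      have := hub y hy
      rw [highKey, highKey, if_neg hy1, if_neg hm1, Prod.Lex.toLex_le_toLex] at this
      rcases this with h | ⟨_, h⟩ <;> omega
    have h0 : (0 : Int) ≤ m := hub' 0 (List.mem_cons_self ..)
    rw [if_neg h1]
    rcases List.mem_cons.mp hmem with h | h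
    · subst h
      exact (foldl_max_const _ _ fun y hy => hub' y (List.mem_cons_of_mem _ hy)).symm
    · exact (foldl_max_of_mem _ _ _ h (fun y hy => hub' y (List.mem_cons_of_mem _ hy)) h0).symm

-- ===== VERDICT (by name: the statement is the Claim_ definition above) =====
theorem highest_spec : Claim_equal_highest := by
  intro five _
  unfold Spec_highest highest highest_alt
  rw [highestGo_eq]
  have hne : PySem.List.sorted ((0 : Int) :: five.map Prod.snd) highKey true ≠ [] := by
    intro h
    exact List.cons_ne_nil _ _ ((PySem.List.sorted_eq_nil_iff _ _ _).mp h)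
  rcases hs : PySem.List.sorted ((0 : Int) :: five.map Prod.snd) highKey true with _ | ⟨m, t⟩
  · exact absurd hs hne
  · simp only [PySem.List.pyGet?, PySem.List.pyIdx?]
    norm_num
    exact (head_ranked five hs).symm
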